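-- pv_equiv track=rewrite | github.com/dzukauskas/acute-medicine | scripts/build_chapter_pack.py | required_authority_basis_for
-- ===== SOURCE A (Python) =====
-- def required_authority_basis_for(
--     block: dict[str, object],
--     matched_claims: list[dict[str, str]],
-- ) -> str:
--     final_renderings = {claim.get("final_rendering", "").strip() for claim in matched_claims}
--     if "keep_lt_normative" in final_renderings:
--         return "LT"
--     if "keep_eu_normative" in final_renderings:
--         return "EU"
--     if final_renderings & {"original_context_callout", "omit"}:
--         return "original-context-only"
--     return str(block.get("authority_basis", "") or "LT")
-- ===== SOURCE B (Python) =====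
-- _RANK = {"keep_lt_normative": 0, "keep_eu_normative": 1,
--          "original_context_callout": 2, "omit": 2}
--
-- def required_authority_basis_for(block, matched_claims):
--     best = 3
--     for claim in matched_claims:
--         best = min(best, _RANK.get(claim.get("final_rendering", "").strip(), 3))
--     if best == 0:
--         return "LT"
--     if best == 1:
--         return "EU"
--     if best == 2:
--         return "original-context-only"
--     return str(block.get("authority_basis", "") or "LT")
-- ===== Notes on version B (the rewrite author's own statement) =====
-- stated objective: alternative
-- what changed: Replaces the set comprehension plus three ordered membership/intersection tests by a single fold keeping the minimum priority rank (LT=0, EU=1, callout/omit=2) over the stripped renderings, decoded after the loop.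
import Mathlib
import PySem

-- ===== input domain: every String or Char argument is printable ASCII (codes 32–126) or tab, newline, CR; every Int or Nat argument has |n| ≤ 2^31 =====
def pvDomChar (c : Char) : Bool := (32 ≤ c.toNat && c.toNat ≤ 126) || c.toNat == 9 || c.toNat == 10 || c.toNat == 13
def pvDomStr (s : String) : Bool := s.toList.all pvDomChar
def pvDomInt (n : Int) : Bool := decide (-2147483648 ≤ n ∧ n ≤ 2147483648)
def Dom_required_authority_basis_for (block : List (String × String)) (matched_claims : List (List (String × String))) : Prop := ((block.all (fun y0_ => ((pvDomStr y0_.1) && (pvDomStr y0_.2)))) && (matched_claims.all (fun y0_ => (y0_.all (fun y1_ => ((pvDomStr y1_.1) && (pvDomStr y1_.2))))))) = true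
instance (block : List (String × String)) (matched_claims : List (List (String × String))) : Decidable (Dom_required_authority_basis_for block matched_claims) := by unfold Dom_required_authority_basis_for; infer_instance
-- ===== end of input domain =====

-- B replaces A's set construction + ordered membership/intersection tests by a single
-- minimum-priority-rank fold over the stripped renderings (alternative decomposition, same cost).

-- ===== PORT A =====
def required_authority_basis_for (block : List (String × String)) (matched_claims : List (List (String × String))) : String :=
  let final_renderings : PySem.Set String :=
    PySem.Set.ofList (matched_claims.map
      (fun claim => PySem.Str.strip ((PySem.Dict.mk claim).getD "final_rendering" "")))
  if final_renderings.contains "keep_lt_normative" then "LT"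
  else if final_renderings.contains "keep_eu_normative" then "EU"
  else if PySem.Set.inter final_renderings
      (PySem.Set.ofList ["original_context_callout", "omit"]) ≠ [] then "original-context-only"
  else
    let ab := (PySem.Dict.mk block).getD "authority_basis" ""
    if ab = "" then "LT" else ab

-- ===== PORT B =====
def pvRankDict : PySem.Dict String Nat :=
  PySem.Dict.ofList [("keep_lt_normative", 0), ("keep_eu_normative", 1),
                     ("original_context_callout", 2), ("omit", 2)]

def required_authority_basis_for_alt (block : List (String × String)) (matched_claims : List (List (String × String))) : String :=
  let best := matched_claims.foldl
    (fun b claim =>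
      min b (pvRankDict.getD (PySem.Str.strip ((PySem.Dict.mk claim).getD "final_rendering" "")) 3)) 3
  if best = 0 then "LT"
  else if best = 1 then "EU"
  else if best = 2 then "original-context-only"
  else
    let ab := (PySem.Dict.mk block).getD "authority_basis" ""
    if ab = "" then "LT" else ab

-- ===== PRECONDITION & SPEC =====
def Spec_required_authority_basis_for (block : List (String × String)) (matched_claims : List (List (String × String))) (out : String) : Prop := out = required_authority_basis_for_alt block matched_claims
instance (block : List (String × String)) (matched_claims : List (List (String × String))) (out : String) : Decidable (Spec_required_authority_basis_for block matched_claims out) := by unfold Spec_required_authority_basis_for; infer_instance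

-- ===== CLAIM (what is proved, stated in full; the proofs are below) =====
def Claim_equal_required_authority_basis_for : Prop := ∀ (block : List (String × String)) (matched_claims : List (List (String × String))), Dom_required_authority_basis_for block matched_claims → Spec_required_authority_basis_for block matched_claims (required_authority_basis_for block matched_claims)

-- ===== LEMMAS AND PROOFS =====

-- the rank a stripped rendering receives in B
def pvRank (s : String) : Nat := pvRankDict.getD s 3

lemma pvRank_eq (s : String) : pvRank s =
    (if s = "keep_lt_normative" then 0
     else if s = "keep_eu_normative" then 1
     else if s = "original_context_callout" then 2
     else if s = "omit" then 2 else 3) := by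
  by_cases h1 : s = "keep_lt_normative"
  · subst h1; decide
  by_cases h2 : s = "keep_eu_normative"
  · subst h2; decide
  by_cases h3 : s = "original_context_callout"
  · subst h3; decide
  by_cases h4 : s = "omit"
  · subst h4; decide
  unfold pvRank pvRankDict
  have e1 : ("keep_lt_normative" == s) = false := by simp [Ne.symm h1]
  have e2 : ("keep_eu_normative" == s) = false := by simp [Ne.symm h2]
  have e3 : ("original_context_callout" == s) = false := by simp [Ne.symm h3]
  have e4 : ("omit" == s) = false := by simp [Ne.symm h4]
  simp [PySem.Dict.ofList, PySem.Dict.getD, PySem.Dict.get?, PySem.Dict.update,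
    PySem.Dict.insert, PySem.Dict.empty, PySem.Dict.contains,
    List.find?, h1, h2, h3, h4, e1, e2, e3, e4]

-- the if-chain value of the minimum rank of a list of stripped renderings
def pvChain (l : List String) : Nat :=
  if "keep_lt_normative" ∈ l then 0
  else if "keep_eu_normative" ∈ l then 1
  else if "original_context_callout" ∈ l ∨ "omit" ∈ l then 2
  else 3

lemma pvChain_le (l : List String) : pvChain l ≤ 3 := by
  unfold pvChain; split_ifs <;> omega

lemma pvFold_min_eq (l : List String) (b : Nat) (hb : b ≤ 3) :
    l.foldl (fun acc s => min acc (pvRank s)) b = min b (pvChain l) := by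
  induction l generalizing b with
  | nil => simp [pvChain]; omega
  | cons x xs ih =>
    rw [List.foldl_cons, ih (min b (pvRank x)) (by omega)]
    have hchain : min (pvRank x) (pvChain xs) = pvChain (x :: xs) := by
      rw [pvRank_eq]
      unfold pvChain
      by_cases h1 : x = "keep_lt_normative" <;>
      by_cases h2 : x = "keep_eu_normative" <;>
      by_cases h3 : x = "original_context_callout" <;>
      by_cases h4 : x = "omit" <;>
      simp [List.mem_cons, h1, h2, h3, h4] <;> split_ifs <;>
      first
        | omega
        | (simp_all [Ne.symm h1, Ne.symm h2, Ne.symm h3, Ne.symm h4]; try omega)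
    rw [← hchain]; exact min_assoc b _ _

theorem required_authority_basis_for_spec : Claim_equal_required_authority_basis_for := by
  intro block mc _
  unfold Spec_required_authority_basis_for required_authority_basis_for required_authority_basis_for_alt
  have hfold : mc.foldl
      (fun b claim => min b (pvRankDict.getD
        (PySem.Str.strip ((PySem.Dict.mk claim).getD "final_rendering" "")) 3)) 3
      = pvChain (mc.map (fun claim => PySem.Str.strip ((PySem.Dict.mk claim).getD "final_rendering" ""))) := by
    have h := pvFold_min_eq (mc.map (fun claim => PySem.Str.strip ((PySem.Dict.mk claim).getD "final_rendering" ""))) 3 (by omega)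
    rw [List.foldl_map] at h
    have hle := pvChain_le (mc.map (fun claim => PySem.Str.strip ((PySem.Dict.mk claim).getD "final_rendering" "")))
    simp only [pvRank] at h
    omega
  simp only [hfold]
  by_cases h1 : "keep_lt_normative" ∈ mc.map (fun claim => PySem.Str.strip ((PySem.Dict.mk claim).getD "final_rendering" "")) <;>
  by_cases h2 : "keep_eu_normative" ∈ mc.map (fun claim => PySem.Str.strip ((PySem.Dict.mk claim).getD "final_rendering" "")) <;>
  by_cases h3 : "original_context_callout" ∈ mc.map (fun claim => PySem.Str.strip ((PySem.Dict.mk claim).getD "final_rendering" "")) <;>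
  by_cases h4 : "omit" ∈ mc.map (fun claim => PySem.Str.strip ((PySem.Dict.mk claim).getD "final_rendering" "")) <;>
  simp [pvChain, h1, h2, h3, h4, PySem.Set.mem_ofList,
    PySem.Set.mem_inter, List.eq_nil_iff_forall_not_mem]
  all_goals
    first
      | (intro h
         obtain ⟨c, hc, hcs⟩ := List.mem_map.mp h3
         exact absurd hcs (h c hc).1)
      | (intro h
         obtain ⟨c, hc, hcs⟩ := List.mem_map.mp h4
         exact absurd hcs (h c hc).2)
      | (intro c hcmem himp
         by_cases hcc : PySem.Str.strip ((PySem.Dict.mk c).getD "final_rendering" "") = "original_context_callout"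
         · exact absurd (List.mem_map.mpr ⟨c, hcmem, hcc⟩) h3
         · exact absurd (List.mem_map.mpr ⟨c, hcmem, himp hcc⟩) h4)
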